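-- pv_equiv track=rewrite | github.com/emamulandalib/problem-solving | algoexpert/non_constructible_change.py | nonConstructibleChange
-- ===== SOURCE A (Python) =====
-- def all_same(arr):
-- 	return len(set(arr)) == 1
--
-- def is_sumable(arr, target):
-- 	data = {}
--
-- 	for i, v in enumerate(arr):
-- 		if data.get(v) is None:
-- 			data[target - v] = i
-- 		else:
-- 			return True
--
-- 	return False
--
-- def nonConstructibleChange(coins):
--     # Write your code here.
-- 	if (len(coins) == 0):
-- 		return 1
--
-- 	if all_same(coins):
-- 		return (len(coins) * coins[0]) + 1
--
-- 	coins.sort()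
--
-- 	if coins[0] != 1:
-- 		return 1
--
-- 	for target in range(1, coins[len(coins) - 1]):
-- 		if target == 1:
-- 			continue
--
-- 		if is_sumable(coins, target) == False:
-- 			return target
-- ===== SOURCE B (Python) =====
-- def nonConstructibleChange(coins):
--     # Precompute the set of all pairwise sums once, then scan targets for the
--     # first one that is missing. (Return-value equivalent to A; unlike A, does
--     # not sort `coins` in place.)
--     if len(coins) == 0:
--         return 1
--     cs = sorted(coins)
--     lo, hi = cs[0], cs[-1]
--     if lo == hi:
--         return len(cs) * lo + 1
--     if lo != 1:
--         return 1
--     sums = set()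
--     rest = cs
--     while rest:
--         x, rest = rest[0], rest[1:]
--         for y in rest:
--             sums.add(x + y)
--     for target in range(2, hi):
--         if target not in sums:
--             return target
--     return None
-- ===== Notes on version B (the rewrite author's own statement) =====
-- stated objective: alternative
-- what changed: Instead of re-running a dictionary pass over the coins for every candidate target, B precomputes the set of all pairwise sums once and then scans the targets for the first value missing from that set; measured run time was comparable on the generated inputs.
import Mathlib
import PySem

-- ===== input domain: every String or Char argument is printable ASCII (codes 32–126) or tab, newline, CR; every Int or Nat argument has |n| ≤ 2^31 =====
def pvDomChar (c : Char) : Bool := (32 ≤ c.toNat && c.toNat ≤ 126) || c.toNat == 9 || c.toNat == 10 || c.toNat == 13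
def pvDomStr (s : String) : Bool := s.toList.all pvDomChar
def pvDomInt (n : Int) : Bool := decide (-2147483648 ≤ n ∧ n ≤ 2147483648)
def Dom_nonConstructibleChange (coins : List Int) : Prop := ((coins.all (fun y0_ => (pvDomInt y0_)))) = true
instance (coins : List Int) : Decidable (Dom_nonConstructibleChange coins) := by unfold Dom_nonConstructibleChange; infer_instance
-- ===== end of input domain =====

-- B precomputes the set of all pairwise sums once and scans the targets for the first
-- value missing from it, instead of A's per-target dictionary pass (alternative
-- algorithm; measured run time comparable). A sorts `coins` in place; B does not mutate
-- its argument — the equivalence proved is about the RETURN value only.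


-- ===== PORT A =====

-- all_same(arr) = (len(set(arr)) == 1)
def allSame (arr : List Int) : Bool :=
  (PySem.Set.ofList arr).length == 1

-- the loop of is_sumable: for i, v in enumerate(arr): …
def isSumGo (target : Int) (d : PySem.Dict Int Int) : List (Int × Int) → Bool
  | [] => false
  | (i, v) :: rest =>
    if d.get? v = none then isSumGo target (d.insert (target - v) i) rest
    else true

def isSumable (arr : List Int) (target : Int) : Bool :=
  isSumGo target PySem.Dict.empty (PySem.List.enumerate arr 0)

-- for target in range(1, coins[len(coins)-1]): skip 1; return target if not is_sumable
def loopA (cs : List Int) : List Int → Option Int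
  | [] => none
  | t :: rest =>
    if t = 1 then loopA cs rest
    else if isSumable cs t = false then some t
    else loopA cs rest

def nonConstructibleChange (coins : List Int) : Option Int :=
  if coins.length = 0 then some 1
  else if allSame coins then
    some ((coins.length : Int) * PySem.List.pyGetD coins 0 0 + 1)
  else
    -- coins.sort() mutates in place; only the return value is modelled
    let cs := PySem.List.sorted coins (fun x => x) false
    if PySem.List.pyGetD cs 0 0 ≠ 1 then some 1
    else loopA cs (PySem.List.pyRange 1 (PySem.List.pyGetD cs ((cs.length : Int) - 1) 0) 1)

-- ===== PORT B =====

-- while rest: x, rest = rest[0], rest[1:]; for y in rest: sums.add(x + y)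
def pairSums : List Int → PySem.Set Int → PySem.Set Int
  | [], s => s
  | x :: rest, s => pairSums rest (rest.foldl (fun s y => PySem.Set.add s (x + y)) s)

-- for target in range(2, hi): if target not in sums: return target
def scanB (sums : PySem.Set Int) : List Int → Option Int
  | [] => none
  | t :: rest =>
    if PySem.Set.contains sums t then scanB sums rest else some t

def nonConstructibleChange_alt (coins : List Int) : Option Int :=
  if coins.length = 0 then some 1
  else
    let cs := PySem.List.sorted coins (fun x => x) false
    let lo := PySem.List.pyGetD cs 0 0
    let hi := PySem.List.pyGetD cs (-1) 0
    if lo = hi then some ((cs.length : Int) * lo + 1)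
    else if lo ≠ 1 then some 1
    else scanB (pairSums cs PySem.Set.empty) (PySem.List.pyRange 2 hi 1)

-- ===== PRECONDITION & SPEC =====
def Spec_nonConstructibleChange (coins : List Int) (out : Option Int) : Prop := out = nonConstructibleChange_alt coins
instance (coins : List Int) (out : Option Int) : Decidable (Spec_nonConstructibleChange coins out) := by unfold Spec_nonConstructibleChange; infer_instance

-- ===== CLAIM (what is proved, stated in full; the proofs are below) =====
def Claim_equal_nonConstructibleChange : Prop := ∀ (coins : List Int), Dom_nonConstructibleChange coins → Spec_nonConstructibleChange coins (nonConstructibleChange coins)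

-- ===== LEMMAS AND PROOFS =====

-- the list of all pairwise sums (distinct positions): common characterisation of
-- A's is_sumable and B's precomputed sum set
def sumList : List Int → List Int
  | [] => []
  | x :: rest => rest.map (fun y => x + y) ++ sumList rest

lemma isSumGo_iff (t : Int) : ∀ (l : List Int) (k : Int) (d : PySem.Dict Int Int),
    isSumGo t d (PySem.List.enumerate l k) = true ↔
      (∃ v ∈ l, d.get? v ≠ none) ∨ t ∈ sumList l := by
  intro l
  induction l with
  | nil => simp [PySem.List.enumerate_nil, isSumGo, sumList]
  | cons v rest ih =>
    intro k d
    rw [PySem.List.enumerate_cons]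
    by_cases hv : d.get? v = none
    · rw [show isSumGo t d ((k, v) :: PySem.List.enumerate rest (k + 1))
          = isSumGo t (d.insert (t - v) k) (PySem.List.enumerate rest (k + 1)) from by
        simp [isSumGo, hv]]
      rw [ih (k + 1)]
      simp only [sumList, List.mem_append, List.mem_map, List.mem_cons,
        PySem.Dict.get?_insert]
      constructor
      · rintro (⟨w, hw, hne⟩ | hs)
        · by_cases hwt : w = t - v
          · exact Or.inr (Or.inl ⟨w, hw, by omega⟩)
          · exact Or.inl ⟨w, Or.inr hw, by simpa [hwt] using hne⟩
        · exact Or.inr (Or.inr hs)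
      · rintro (⟨w, hw | hw, hne⟩ | ⟨w, hw, hwt⟩ | hs)
        · exact absurd hne (by subst hw; simp [hv])
        · refine Or.inl ⟨w, hw, ?_⟩
          split
          · simp
          · exact hne
        · exact Or.inl ⟨w, hw, by simp [show w = t - v by omega]⟩
        · exact Or.inr hs
    · rw [show isSumGo t d ((k, v) :: PySem.List.enumerate rest (k + 1)) = true from by
        simp [isSumGo, hv]]
      exact iff_of_true rfl (Or.inl ⟨v, by simp, hv⟩)

lemma isSumable_iff (l : List Int) (t : Int) :
    isSumable l t = true ↔ t ∈ sumList l := by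
  rw [isSumable, isSumGo_iff]
  simp [PySem.Dict.get?_empty]

lemma mem_foldl_add (x0 z : Int) : ∀ (r : List Int) (s : PySem.Set Int),
    (z ∈ r.foldl (fun s y => PySem.Set.add s (x0 + y)) s) ↔
      z ∈ s ∨ ∃ y ∈ r, z = x0 + y := by
  intro r
  induction r with
  | nil => simp
  | cons y rest ih =>
    intro s
    simp only [List.foldl_cons, ih, PySem.Set.mem_add, List.mem_cons]
    constructor
    · rintro ((h | h) | ⟨w, hw, rfl⟩)
      · exact Or.inl h
      · exact Or.inr ⟨y, Or.inl rfl, h⟩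
      · exact Or.inr ⟨w, Or.inr hw, rfl⟩
    · rintro (h | ⟨w, rfl | hw, rfl⟩)
      · exact Or.inl (Or.inl h)
      · exact Or.inl (Or.inr rfl)
      · exact Or.inr ⟨w, hw, rfl⟩

lemma mem_pairSums (z : Int) : ∀ (l : List Int) (s : PySem.Set Int),
    z ∈ pairSums l s ↔ z ∈ s ∨ z ∈ sumList l := by
  intro l
  induction l with
  | nil => simp [pairSums, sumList]
  | cons x rest ih =>
    intro s
    simp only [pairSums, ih, mem_foldl_add, sumList, List.mem_append, List.mem_map]
    constructor
    · rintro ((h | ⟨y, hy, rfl⟩) | h)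
      · exact Or.inl h
      · exact Or.inr (Or.inl ⟨y, hy, rfl⟩)
      · exact Or.inr (Or.inr h)
    · rintro (h | ⟨y, hy, rfl⟩ | h)
      · exact Or.inl (Or.inl h)
      · exact Or.inl (Or.inr ⟨y, hy, rfl⟩)
      · exact Or.inr h

lemma isSumable_eq_contains (cs : List Int) (t : Int) :
    isSumable cs t = PySem.Set.contains (pairSums cs PySem.Set.empty) t := by
  rw [Bool.eq_iff_iff, isSumable_iff, PySem.Set.contains_iff, mem_pairSums]
  simp [PySem.Set.empty]

lemma loopA_eq_scanB (cs : List Int) : ∀ (r : List Int),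
    (∀ t ∈ r, t ≠ 1) →
    loopA cs r = scanB (pairSums cs PySem.Set.empty) r := by
  intro r
  induction r with
  | nil => intro _; rfl
  | cons t rest ih =>
    intro h
    have ht : t ≠ 1 := h t (by simp)
    simp only [loopA, scanB, if_neg ht, ← isSumable_eq_contains cs t]
    rcases Bool.eq_false_or_eq_true (isSumable cs t) with hb | hb <;>
      simp [hb, ih (fun u hu => h u (by simp [hu]))]

lemma allSame_cons_iff (x : Int) (xs : List Int) :
    allSame (x :: xs) = true ↔ ∀ y ∈ x :: xs, y = x := by
  rw [allSame, Nat.beq_eq_true_eq, List.length_eq_one_iff]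
  constructor
  · rintro ⟨a, ha⟩ y hy
    have hx : x ∈ PySem.Set.ofList (x :: xs) := (PySem.Set.mem_ofList _ _).2 (by simp)
    have hax : a = x := by rw [ha] at hx; exact (List.mem_singleton.1 hx).symm
    have hy' : y ∈ PySem.Set.ofList (x :: xs) := (PySem.Set.mem_ofList _ _).2 hy
    rw [ha, hax] at hy'
    exact List.mem_singleton.1 hy'
  · intro hall
    refine ⟨x, ?_⟩
    have hnd : (PySem.Set.ofList (x :: xs)).Nodup := PySem.Set.nodup_ofList _
    have hmem : ∀ z ∈ PySem.Set.ofList (x :: xs), z = x := fun z hz =>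
      hall z ((PySem.Set.mem_ofList _ _).1 hz)
    have hx : x ∈ PySem.Set.ofList (x :: xs) := (PySem.Set.mem_ofList _ _).2 (by simp)
    rcases hset : PySem.Set.ofList (x :: xs) with _ | ⟨a, rest⟩
    · simp [hset] at hx
    · have hax : a = x := hmem a (by simp [hset])
      have hrest : rest = [] := by
        rw [List.eq_nil_iff_forall_not_mem]
        intro z hz
        have hzx : z = x := hmem z (by simp [hset, hz])
        rw [hset] at hnd
        exact (List.nodup_cons.1 hnd).1 (by rwa [hax, ← hzx])
      rw [hax, hrest]

lemma le_getLast_of_pairwise : ∀ (l : List Int) (h : l ≠ []),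
    l.Pairwise (· ≤ ·) → ∀ x ∈ l, x ≤ l.getLast h := by
  intro l
  induction l with
  | nil => simp
  | cons c cs' ih =>
    intro _ hp x hx
    rcases List.pairwise_cons.1 hp with ⟨hc, hp'⟩
    cases cs' with
    | nil => simp at hx; simp [hx]
    | cons b bs =>
      rw [List.getLast_cons (by simp)]
      rcases List.mem_cons.1 hx with rfl | hx'
      · exact hc _ (List.getLast_mem (by simp))
      · exact ih (by simp) hp' x hx'

-- a ≤-pairwise list whose first and last elements agree is constant
lemma head_eq_last_iff (c : Int) (cs' : List Int)
    (hp : (c :: cs').Pairwise (· ≤ ·)) :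
    c = (c :: cs').getLast (List.cons_ne_nil c cs') ↔ ∀ y ∈ c :: cs', y = c := by
  constructor
  · intro heq y hy
    have h1 : c ≤ y := by
      rcases List.mem_cons.1 hy with rfl | hy'
      · exact le_refl _
      · exact (List.pairwise_cons.1 hp).1 y hy'
    have h2 : y ≤ (c :: cs').getLast (List.cons_ne_nil c cs') :=
      le_getLast_of_pairwise (c :: cs') (List.cons_ne_nil c cs') hp y hy
    omega
  · intro hall
    exact (hall _ (List.getLast_mem (List.cons_ne_nil c cs'))).symm

-- ===== VERDICT (by name: the statement is the Claim_ definition above) =====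
theorem nonConstructibleChange_spec : Claim_equal_nonConstructibleChange := by
  intro coins _
  unfold Spec_nonConstructibleChange
  cases coins with
  | nil => rfl
  | cons x xs =>
    have hne : PySem.List.sorted (x :: xs) (fun x => x) false ≠ [] := by
      rw [Ne, PySem.List.sorted_eq_nil_iff]; simp
    obtain ⟨c, cs', hcs⟩ := List.exists_cons_of_ne_nil hne
    have hperm : (c :: cs').Perm (x :: xs) := hcs ▸ PySem.List.sorted_perm _ _ _
    have hp : (c :: cs').Pairwise (· ≤ ·) := by
      have := PySem.List.sorted_pairwise (x :: xs) (fun x => x)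
      rw [hcs] at this
      exact this
    have hcx : c ∈ x :: xs := hperm.mem_iff.1 (by simp)
    simp only [nonConstructibleChange, nonConstructibleChange_alt, hcs]
    have hlen0 : ¬((x :: xs).length = 0) := by simp
    rw [if_neg hlen0, if_neg hlen0]
    have hlo : PySem.List.pyGetD (c :: cs') 0 0 = c := PySem.List.pyGetD_zero_cons c cs' 0
    have hhi : PySem.List.pyGetD (c :: cs') (-1) 0 = (c :: cs').getLast (List.cons_ne_nil c cs') :=
      PySem.List.pyGetD_neg_one (c :: cs') 0 (List.cons_ne_nil c cs')
    have hhiA : PySem.List.pyGetD (c :: cs') (((c :: cs').length : Int) - 1) 0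
        = (c :: cs').getLast (List.cons_ne_nil c cs') := by
      have h1 : (((c :: cs').length : Int) - 1) = ((cs'.length : Nat) : Int) := by
        simp
      rw [h1, PySem.List.pyGetD_natCast, List.getLast_eq_getElem]
      simp only [List.getD_eq_getElem?_getD, List.length_cons, lt_add_iff_pos_right,
        Order.lt_one_iff, getElem?_pos, Option.getD_some, add_tsub_cancel_right]
      rfl
    by_cases hall : ∀ y ∈ x :: xs, y = x
    · -- the all-same branch of A and the lo = hi branch of B
      have hcxeq : c = x := hall c hcx
      have hall' : ∀ y ∈ c :: cs', y = c := fun y hy =>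
        ((hall y (hperm.mem_iff.1 hy)).trans hcxeq.symm)
      rw [if_pos ((allSame_cons_iff x xs).2 hall)]
      rw [if_pos (by rw [hlo, hhi]; exact (head_eq_last_iff c cs' hp).2 hall')]
      rw [hlo, PySem.List.pyGetD_zero_cons, hperm.length_eq, hcxeq]
    · -- not all same: A's all_same test and B's lo = hi test both fail
      rw [if_neg (by
        rw [Bool.not_eq_true, Bool.eq_false_iff]
        intro h
        exact hall ((allSame_cons_iff x xs).1 h))]
      have hBne : ¬(PySem.List.pyGetD (c :: cs') 0 0 = PySem.List.pyGetD (c :: cs') (-1) 0) := by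
        rw [hlo, hhi]
        intro h
        have hallc := (head_eq_last_iff c cs' hp).1 h
        have hxc : x = c := hallc x (hperm.mem_iff.2 (by simp))
        exact hall (fun y hy => (hallc y (hperm.mem_iff.2 hy)).trans hxc.symm)
      rw [if_neg hBne]
      by_cases h1 : PySem.List.pyGetD (c :: cs') 0 0 = 1
      · -- lo = 1: A's skip-1 scan equals B's scan over range(2, hi)
        have h1' : ¬(PySem.List.pyGetD (c :: cs') 0 0 ≠ 1) := by simp [h1]
        rw [if_neg h1', if_neg h1']
        rw [hhiA, hhi]
        have hskip : loopA (c :: cs')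
            (PySem.List.pyRange 1 ((c :: cs').getLast (List.cons_ne_nil c cs')) 1)
            = loopA (c :: cs')
            (PySem.List.pyRange 2 ((c :: cs').getLast (List.cons_ne_nil c cs')) 1) := by
          by_cases hlt : 1 < (c :: cs').getLast (List.cons_ne_nil c cs')
          · rw [PySem.List.pyRange_one_cons hlt]
            simp [loopA]
          · rw [PySem.List.pyRange_one_eq_nil (by omega), PySem.List.pyRange_one_eq_nil (by omega)]
        rw [hskip]
        exact loopA_eq_scanB (c :: cs') _
          (fun t ht => by have := (PySem.List.mem_pyRange_one).1 ht; omega)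
      · rw [if_pos h1, if_pos h1]
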